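-- pv_equiv track=rewrite | github.com/leonardocarvalho/advent-of-code-2020 | 12/solve.py | compute_new_direction
-- ===== SOURCE A (Python) =====
-- def compute_new_direction(action, value, current_direction):
--     DIRECTION_CONVERSION = {
--         "L": {
--             "N": "W",
--             "S": "E",
--             "E": "N",
--             "W": "S",
--         },
--         "R": {
--             "N": "E",
--             "S": "W",
--             "E": "S",
--             "W": "N",
--         }
--     }
--     number_of_turns = value // 90
--     while number_of_turns > 0:
--         current_direction = DIRECTION_CONVERSION[action][current_direction]
--         number_of_turns -= 1
--     return current_direction
-- ===== SOURCE B (Python) =====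
-- def compute_new_direction(action, value, current_direction):
--     turns = value // 90
--     if turns <= 0:
--         return current_direction
--     step = {"L": -1, "R": 1}[action]
--     i = {"N": 0, "E": 1, "S": 2, "W": 3}[current_direction]
--     return ["N", "E", "S", "W"][(i + step * turns) % 4]
-- ===== Notes on version B (the rewrite author's own statement) =====
-- stated objective: simpler
-- what changed: Replaces the per-90-degree rotation loop over a nested conversion dict with a single modular index computation on the clockwise cycle N,E,S,W.
import Mathlib
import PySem

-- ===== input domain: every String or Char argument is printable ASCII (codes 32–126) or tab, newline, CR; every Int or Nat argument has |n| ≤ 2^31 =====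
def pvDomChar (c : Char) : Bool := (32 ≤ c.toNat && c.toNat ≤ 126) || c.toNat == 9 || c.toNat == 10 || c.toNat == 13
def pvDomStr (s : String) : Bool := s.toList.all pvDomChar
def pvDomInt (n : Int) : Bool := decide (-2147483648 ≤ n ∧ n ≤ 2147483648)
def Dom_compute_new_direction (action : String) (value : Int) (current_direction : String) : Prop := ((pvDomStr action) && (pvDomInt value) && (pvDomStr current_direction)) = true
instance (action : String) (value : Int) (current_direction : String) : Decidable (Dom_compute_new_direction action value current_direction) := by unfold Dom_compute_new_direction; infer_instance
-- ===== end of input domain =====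

-- B replaces A's one-step-per-90° rotation loop with a single modular index computation
-- (objective: simpler/faster on large values); return values proved equal wherever A returns.

-- ===== PORT A =====
-- the nested dict DIRECTION_CONVERSION; a KeyError (missing action or direction) is
-- excluded by Pre_, so the total lookup uses "" as the (never used) default
def cndConv : PySem.Dict String (PySem.Dict String String) :=
  PySem.Dict.ofList
    [("L", PySem.Dict.ofList [("N","W"),("S","E"),("E","N"),("W","S")]),
     ("R", PySem.Dict.ofList [("N","E"),("S","W"),("E","S"),("W","N")])]

-- the while-loop: number_of_turns counts down to 0, rewriting current_direction each turn
def cndLoop (action : String) : Nat → String → String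
  | 0, d => d
  | n + 1, d => cndLoop action n ((cndConv.getD action (PySem.Dict.ofList [])).getD d "")

def compute_new_direction (action : String) (value : Int) (current_direction : String) : String :=
  let number_of_turns := PySem.Int.floordiv value 90
  cndLoop action number_of_turns.toNat current_direction

-- ===== PORT B =====
def compute_new_direction_alt (action : String) (value : Int) (current_direction : String) : String :=
  let turns := PySem.Int.floordiv value 90
  if turns ≤ 0 then current_direction
  else
    let step := (PySem.Dict.ofList [("L", (-1 : Int)), ("R", 1)]).getD action 0
    let i := (PySem.Dict.ofList [("N", (0 : Int)), ("E", 1), ("S", 2), ("W", 3)]).getD current_direction 0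
    PySem.List.pyGetD ["N", "E", "S", "W"] (PySem.Int.mod (i + step * turns) 4) ""

-- ===== PRECONDITION & SPEC =====
-- Pre_ excludes exactly the inputs on which A raises KeyError: a positive number of turns
-- together with an action outside {L,R} or a direction outside {N,E,S,W}.
def Pre_compute_new_direction (action : String) (value : Int) (current_direction : String) : Prop :=
  PySem.Int.floordiv value 90 ≤ 0 ∨
    ((action = "L" ∨ action = "R") ∧
     (current_direction = "N" ∨ current_direction = "E" ∨
      current_direction = "S" ∨ current_direction = "W"))
instance (action : String) (value : Int) (current_direction : String) : Decidable (Pre_compute_new_direction action value current_direction) := by unfold Pre_compute_new_direction; infer_instance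

def pvWitness_compute_new_direction : String × Int × String := ("R", 270, "N")

def Spec_compute_new_direction (action : String) (value : Int) (current_direction : String) (out : String) : Prop := out = compute_new_direction_alt action value current_direction
instance (action : String) (value : Int) (current_direction : String) (out : String) : Decidable (Spec_compute_new_direction action value current_direction out) := by unfold Spec_compute_new_direction; infer_instance

-- ===== CLAIM (what is proved, stated in full; the proofs are below) =====
def Claim_equal_compute_new_direction : Prop := ∀ (action : String) (value : Int) (current_direction : String), Dom_compute_new_direction action value current_direction → Pre_compute_new_direction action value current_direction → Spec_compute_new_direction action value current_direction (compute_new_direction action value current_direction)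

-- ===== LEMMAS AND PROOFS =====

-- A's loop is 4-periodic: four quarter-turns are the identity on the valid directions.
theorem cndLoop_four (action d : String)
    (ha : action = "L" ∨ action = "R")
    (hd : d = "N" ∨ d = "E" ∨ d = "S" ∨ d = "W") (n : Nat) :
    cndLoop action (n + 4) d = cndLoop action n d := by
  rcases ha with rfl | rfl <;> rcases hd with rfl | rfl | rfl | rfl <;> rfl

theorem cndLoop_mod (action d : String)
    (ha : action = "L" ∨ action = "R")
    (hd : d = "N" ∨ d = "E" ∨ d = "S" ∨ d = "W") (n : Nat) :
    cndLoop action n d = cndLoop action (n % 4) d := by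
  induction n using Nat.strong_induction_on with
  | _ n ih =>
    by_cases h : n < 4
    · rw [Nat.mod_eq_of_lt h]
    · obtain ⟨m, rfl⟩ : ∃ m, n = m + 4 := ⟨n - 4, by omega⟩
      rw [cndLoop_four action d ha hd m, ih m (by omega)]
      congr 1
      omega

-- ===== VERDICT (by name: the statement is the Claim_ definition above) =====

theorem compute_new_direction_spec : Claim_equal_compute_new_direction := by
  intro action value current_direction _ hpre
  unfold Spec_compute_new_direction compute_new_direction compute_new_direction_alt
  set t := PySem.Int.floordiv value 90 with ht
  by_cases h0 : t ≤ 0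
  · have : t.toNat = 0 := by omega
    simp [this, cndLoop, h0]
  · rcases hpre with h | ⟨ha, hd⟩
    · exact absurd h h0
    have hpos : 0 < t := by omega
    -- replace t by its value as a Nat
    obtain ⟨n, hn⟩ : ∃ n : Nat, t = (n : Int) := ⟨t.toNat, by omega⟩
    rw [if_neg h0]
    simp only [hn, Int.toNat_natCast]
    rw [cndLoop_mod action current_direction ha hd n]
    have hr : n % 4 = 0 ∨ n % 4 = 1 ∨ n % 4 = 2 ∨ n % 4 = 3 := by omega
    have harith : ∀ (i s : Int), PySem.Int.mod (i + s * (n : Int)) 4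
        = PySem.Int.mod (i + s * ((n % 4 : Nat) : Int)) 4 := by
      intro i s
      have h4 : (0:Int) < 4 := by norm_num
      rw [PySem.Int.mod_eq_emod_of_pos h4, PySem.Int.mod_eq_emod_of_pos h4,
        Int.add_emod, Int.mul_emod,
        show ((n : Int) % 4) = ((n % 4 : Nat) : Int) % 4 by push_cast; omega,
        ← Int.mul_emod, ← Int.add_emod]
    rcases ha with rfl | rfl <;> rcases hd with rfl | rfl | rfl | rfl <;>
      rw [harith] <;> rcases hr with h | h | h | h <;> rw [h] <;> decide
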